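-- pv_equiv track=rewrite | github.com/TiGRoNdev/python-texcalc | TeXCalc/core.py | avoid_parentheses
-- ===== SOURCE A (Python) =====
-- def avoid_parentheses(context):
--     if (
--         not isinstance(context, (str, list, tuple))
--         or len(context) <= 2
--         or (context[0] != '(' and context[-1] != ')')
--     ):
--         return context
--
--     balance = 0
--     for char in context[1:-1]:
--         if char == '(':
--             balance += 1
--         elif char == ')' and balance > 0:
--             balance -= 1
--         elif char == ')' and balance <= 0:
--             return context
--
--     return context[1:-1] if balance == 0 else context
-- ===== SOURCE B (Python) =====
-- def _prefix_sums(xs):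
--     out = []
--     s = 0
--     for x in xs:
--         s += x
--         out.append(s)
--     return out
--
--
-- def avoid_parentheses(context):
--     if (
--         not isinstance(context, (str, list, tuple))
--         or len(context) <= 2
--         or (context[0] != '(' and context[-1] != ')')
--     ):
--         return context
--     inner = context[1:-1]
--     deltas = [1 if c == '(' else -1 if c == ')' else 0 for c in inner]
--     prefixes = _prefix_sums(deltas)
--     if any(p < 0 for p in prefixes):
--         return context
--     total = prefixes[-1] if prefixes else 0
--     return inner if total == 0 else context
-- ===== Notes on version B (the rewrite author's own statement) =====
-- stated objective: alternative
-- what changed: Replaces A's stateful balance loop with early return by computing the interior's delta/prefix-sum lists and deciding from aggregates (any negative prefix, final total).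
import Mathlib
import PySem

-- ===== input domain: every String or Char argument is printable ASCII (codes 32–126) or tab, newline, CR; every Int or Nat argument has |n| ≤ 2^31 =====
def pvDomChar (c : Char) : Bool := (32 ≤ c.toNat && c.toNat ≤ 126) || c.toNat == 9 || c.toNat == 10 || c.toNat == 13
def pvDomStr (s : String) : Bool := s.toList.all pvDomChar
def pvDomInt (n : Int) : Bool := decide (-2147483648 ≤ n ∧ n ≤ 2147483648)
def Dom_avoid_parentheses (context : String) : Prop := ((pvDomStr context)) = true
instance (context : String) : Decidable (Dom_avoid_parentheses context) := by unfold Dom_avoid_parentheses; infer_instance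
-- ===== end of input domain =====

-- B replaces A's stateful early-return balance loop by a prefix-sum list and decides from
-- aggregates (any negative prefix / final total); objective: alternative decomposition, same cost.

-- ===== PORT A =====
-- A's for-loop with early return: `none` = the early `return context`, `some b` = final balance.
def pvLoopA : List Char → Int → Option Int
  | [], b => some b
  | c :: cs, b =>
    if c = '(' then pvLoopA cs (b + 1)
    else if c = ')' ∧ b > 0 then pvLoopA cs (b - 1)
    else if c = ')' ∧ b ≤ 0 then none
    else pvLoopA cs b

def avoid_parentheses (context : String) : String :=
  let cs := context.toList
  if cs.length ≤ 2 ∨ (cs.head? ≠ some '(' ∧ cs.getLast? ≠ some ')') then context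
  else
    match pvLoopA (cs.drop 1).dropLast 0 with
    | none => context
    | some b => if b = 0 then String.ofList ((cs.drop 1).dropLast) else context

-- ===== PORT B =====
-- Source B's _prefix_sums: running sums of xs starting from s (called with s = 0).
def pvPrefixSums : List Int → Int → List Int
  | [], _ => []
  | x :: xs, s => (s + x) :: pvPrefixSums xs (s + x)

def pvDelta (c : Char) : Int := if c = '(' then 1 else if c = ')' then -1 else 0

def avoid_parentheses_alt (context : String) : String :=
  let cs := context.toList
  if cs.length ≤ 2 ∨ (cs.head? ≠ some '(' ∧ cs.getLast? ≠ some ')') then context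
  else
    let inner := (cs.drop 1).dropLast
    let deltas := inner.map pvDelta
    let prefixes := pvPrefixSums deltas 0
    if prefixes.any (fun p => p < 0) then context
    else if (prefixes.getLast?.getD 0) = 0 then String.ofList inner else context

-- ===== PRECONDITION & SPEC =====
def Spec_avoid_parentheses (context : String) (out : String) : Prop := out = avoid_parentheses_alt context
instance (context : String) (out : String) : Decidable (Spec_avoid_parentheses context out) := by unfold Spec_avoid_parentheses; infer_instance

-- ===== CLAIM (what is proved, stated in full; the proofs are below) =====
def Claim_equal_avoid_parentheses : Prop := ∀ (context : String), Dom_avoid_parentheses context → Spec_avoid_parentheses context (avoid_parentheses context)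

-- ===== LEMMAS AND PROOFS =====

-- running-prefix characterisation of A's loop (invariant: balance stays ≥ 0)
theorem pvLoopA_eq_prefix (cs : List Char) :
    ∀ b : Int, 0 ≤ b →
      pvLoopA cs b =
        if (pvPrefixSums (cs.map pvDelta) b).any (fun p => p < 0) then none
        else some (b + (cs.map pvDelta).sum) := by
  induction cs with
  | nil => intro b hb; simp [pvLoopA, pvPrefixSums]
  | cons c cs ih =>
    intro b hb
    by_cases hop : c = '('
    · subst hop
      have hd : pvDelta '(' = 1 := rfl
      have hne : decide ((b + 1) < 0) = false := by simp; omega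
      rw [show pvLoopA ('(' :: cs) b = pvLoopA cs (b + 1) from by simp [pvLoopA]]
      rw [ih (b + 1) (by omega)]
      simp only [List.map_cons, hd, pvPrefixSums, List.any_cons, hne, Bool.false_or,
        List.sum_cons]
      split
      · rfl
      · simp only [Option.some.injEq]; ring
    · by_cases hcl : c = ')'
      · subst hcl
        have hd : pvDelta ')' = -1 := rfl
        by_cases hpos : b > 0
        · have hne : decide ((b + -1) < 0) = false := by simp; omega
          rw [show pvLoopA (')' :: cs) b = pvLoopA cs (b - 1) from by
            simp [pvLoopA, hpos]]
          rw [ih (b - 1) (by omega)]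
          simp only [List.map_cons, hd, pvPrefixSums, List.any_cons, hne, Bool.false_or,
            List.sum_cons, show b - 1 = b + -1 from by ring]
          split
          · rfl
          · simp only [Option.some.injEq]; ring
        · have hb0 : b = 0 := by omega
          subst hb0
          rw [show pvLoopA (')' :: cs) 0 = none from by simp [pvLoopA]]
          simp [List.map_cons, hd, pvPrefixSums]
      · have hd : pvDelta c = 0 := by simp [pvDelta, hop, hcl]
        have hne : decide (b < 0) = false := by simp; omega
        rw [show pvLoopA (c :: cs) b = pvLoopA cs b from by simp [pvLoopA, hop, hcl]]
        rw [ih b hb]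
        simp only [List.map_cons, hd, pvPrefixSums, List.any_cons, List.sum_cons, add_zero,
          hne, Bool.false_or]
        split
        · rfl
        · simp only [Option.some.injEq]; ring

theorem pvPrefixSums_getLast (xs : List Int) :
    ∀ s : Int, (pvPrefixSums xs s).getLast?.getD s = s + xs.sum := by
  induction xs with
  | nil => intro s; simp [pvPrefixSums]
  | cons x xs ih =>
    intro s
    simp only [pvPrefixSums, List.sum_cons]
    cases h : pvPrefixSums xs (s + x) with
    | nil =>
      have := ih (s + x)
      rw [h] at this
      simp at this ⊢
      omega
    | cons y ys =>
      have hih := ih (s + x)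
      rw [h] at hih
      rw [List.getLast?_cons_cons]
      cases hq : (y :: ys).getLast? with
      | none => simp at hq
      | some l =>
        rw [hq] at hih
        simp at hih ⊢
        omega

-- ===== VERDICT (by name: the statement is the Claim_ definition above) =====
theorem avoid_parentheses_spec : Claim_equal_avoid_parentheses := by
  intro context _
  unfold Spec_avoid_parentheses avoid_parentheses avoid_parentheses_alt
  simp only
  split
  · rfl
  · rw [pvLoopA_eq_prefix _ 0 le_rfl]
    rw [show ((0 : Int) + ((context.toList.drop 1).dropLast.map pvDelta).sum)
          = ((context.toList.drop 1).dropLast.map pvDelta).sum by ring]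
    have hl := pvPrefixSums_getLast ((context.toList.drop 1).dropLast.map pvDelta) 0
    rw [show ((0 : Int) + ((context.toList.drop 1).dropLast.map pvDelta).sum)
          = ((context.toList.drop 1).dropLast.map pvDelta).sum by ring] at hl
    split
    · simp_all
    · simp_all
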